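-- pv_equiv track=rewrite | github.com/MAK13789/UofT-ESC180 | midterm 2015.py | is_almost_symmetric
-- ===== SOURCE A (Python) =====
-- def is_symmetric(L):
--     return (L == list(reversed(L)))
--
-- def is_almost_symmetric(L):
--     for i in range(len(L)):
--         for j in range(len(L)):
--             temp_1 = L[i]
--             temp_2 = L[j]
--             new_list = L[:]
--             new_list[j] = temp_1
--             new_list[i] = temp_2
--             if is_symmetric(new_list) == True:
--                 return True
--     return False
-- ===== SOURCE B (Python) =====
-- def is_almost_symmetric(L):
--     n = len(L)
--     mism = [i for i in range(n // 2) if L[i] != L[n - 1 - i]]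
--     if len(mism) == 0:
--         return True
--     if len(mism) > 2:
--         return False
--     if len(mism) == 1:
--         i = mism[0]
--         x, y = L[i], L[n - 1 - i]
--         return n % 2 == 1 and L[n // 2] in (x, y)
--     a, b = mism
--     x, y = L[a], L[n - 1 - a]
--     u, v = L[b], L[n - 1 - b]
--     return (u == y and x == v) or (u == x and v == y)
-- ===== Notes on version B (the rewrite author's own statement) =====
-- stated objective: faster
-- what changed: Replaced the O(n^3) try-every-swap-and-check-palindrome search by a single linear scan that collects the mismatched symmetric pairs and decides fixability by a constant-size case analysis on at most two mismatches.
-- intended difference: On the empty list A returns False because its loops never run, while B returns True; the empty list is a palindrome (zero swaps needed), so True is the intended value. — e.g. on is_almost_symmetric([]): A returns false, B returns true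
import Mathlib
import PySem

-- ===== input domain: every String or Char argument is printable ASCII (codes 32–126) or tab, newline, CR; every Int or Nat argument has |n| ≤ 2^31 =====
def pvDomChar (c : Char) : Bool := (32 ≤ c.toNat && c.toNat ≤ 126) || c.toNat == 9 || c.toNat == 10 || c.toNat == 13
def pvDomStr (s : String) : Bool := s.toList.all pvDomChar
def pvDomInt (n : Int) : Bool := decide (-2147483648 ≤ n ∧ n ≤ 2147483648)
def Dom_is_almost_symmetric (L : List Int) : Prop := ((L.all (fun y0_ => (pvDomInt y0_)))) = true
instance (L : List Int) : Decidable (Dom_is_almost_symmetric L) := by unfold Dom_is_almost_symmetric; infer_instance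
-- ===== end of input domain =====

-- B replaces A's O(n^3) try-every-swap search with one linear scan over the mismatched
-- symmetric pairs and a constant-size case analysis; equivalence is about return values only,
-- with the empty list stated as an intended difference (A returns False there, B True).

-- ===== PORT A =====
-- Python's L[i]/L[j] with 0 ≤ i,j < len(L) is exactly List.getD i 0; L[:] then two item
-- assignments is List.set twice; 'L == list(reversed(L))' is List beq with reverse.
def is_symmetric (L : List Int) : Bool := L == L.reverse

def is_almost_symmetric (L : List Int) : Bool :=
  (List.range L.length).any (fun i =>
    (List.range L.length).any (fun j =>
      let temp_1 := L.getD i 0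
      let temp_2 := L.getD j 0
      let new_list := (L.set j temp_1).set i temp_2
      is_symmetric new_list))

-- ===== PORT B =====
-- Source B's comprehension: indices i < n//2 whose symmetric counterpart differs
def pvMism (L : List Int) : List Nat :=
  (List.range (L.length / 2)).filter (fun i => !(L.getD i 0 == L.getD (L.length - 1 - i) 0))

def is_almost_symmetric_alt (L : List Int) : Bool :=
  let n := L.length
  match pvMism L with
  | [] => true
  | [i] => decide (n % 2 = 1) &&
      (L.getD (n / 2) 0 == L.getD i 0 || L.getD (n / 2) 0 == L.getD (n - 1 - i) 0)
  | [a, b] =>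
      (L.getD b 0 == L.getD (n - 1 - a) 0 && L.getD a 0 == L.getD (n - 1 - b) 0) ||
      (L.getD b 0 == L.getD a 0 && L.getD (n - 1 - b) 0 == L.getD (n - 1 - a) 0)
  | _ => false

-- ===== PRECONDITION & SPEC =====
-- On the empty list A returns false because its loops never run, while B returns true;
-- the empty list is a palindrome (zero swaps needed), so true is the intended value.
def D_is_almost_symmetric (L : List Int) : Prop := L = []
instance (L : List Int) : Decidable (D_is_almost_symmetric L) := by
  unfold D_is_almost_symmetric; infer_instance

def Spec_is_almost_symmetric (L : List Int) (out : Bool) : Prop :=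
  ¬ D_is_almost_symmetric L → out = is_almost_symmetric_alt L
instance (L : List Int) (out : Bool) : Decidable (Spec_is_almost_symmetric L out) := by
  unfold Spec_is_almost_symmetric; infer_instance

def pvDiffWitness_is_almost_symmetric : List Int := []
def pvDiffWitnessOut_is_almost_symmetric : Bool × Bool := (false, true)

-- ===== CLAIM (what is proved, stated in full; the proofs are below) =====
def Claim_unchanged_is_almost_symmetric : Prop :=
  ∀ (L : List Int), Dom_is_almost_symmetric L →
    Spec_is_almost_symmetric L (is_almost_symmetric L)
def Claim_changed_is_almost_symmetric : Prop :=
  Dom_is_almost_symmetric (pvDiffWitness_is_almost_symmetric) ∧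
  D_is_almost_symmetric (pvDiffWitness_is_almost_symmetric) ∧
  is_almost_symmetric (pvDiffWitness_is_almost_symmetric) = pvDiffWitnessOut_is_almost_symmetric.1 ∧
  is_almost_symmetric_alt (pvDiffWitness_is_almost_symmetric) = pvDiffWitnessOut_is_almost_symmetric.2 ∧
  pvDiffWitnessOut_is_almost_symmetric.1 ≠ pvDiffWitnessOut_is_almost_symmetric.2
def Claim_exact_is_almost_symmetric : Prop :=
  ∀ (L : List Int), Dom_is_almost_symmetric L → D_is_almost_symmetric L →
    is_almost_symmetric L ≠ is_almost_symmetric_alt L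

-- ===== LEMMAS AND PROOFS =====

-- element access used throughout the proofs
def gi (L : List Int) (k : Nat) : Int := L.getD k 0

-- pointwise value of A's swapped list
def swv (L : List Int) (i j k : Nat) : Int :=
  if k = i then gi L j else if k = j then gi L i else gi L k

theorem swv_comm (L : List Int) (i j k : Nat) : swv L i j k = swv L j i k := by
  unfold swv; by_cases hik : k = i <;> by_cases hjk : k = j <;>
    simp [hik, hjk] <;> simp_all [gi]

theorem mem_pvMism (L : List Int) (k : Nat) :
    k ∈ pvMism L ↔ k < L.length / 2 ∧ gi L k ≠ gi L (L.length - 1 - k) := by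
  unfold pvMism gi
  simp [List.mem_filter, List.mem_range]

theorem getD_eq_getElem (L : List Int) (k : Nat) (h : k < L.length) :
    L.getD k 0 = L[k] := by
  simp [List.getD_eq_getElem?_getD, List.getElem?_eq_getElem h]

-- A's palindrome test, pointwise
theorem pal_iff (L : List Int) :
    (L == L.reverse) = true ↔ ∀ k, k < L.length → gi L k = gi L (L.length - 1 - k) := by
  rw [beq_iff_eq]
  constructor
  · intro h k hk
    have h2 : L.length - 1 - k < L.length := by omega
    rw [gi, gi, getD_eq_getElem L k hk, getD_eq_getElem L _ h2]
    have e := List.getElem_of_eq h hk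
    rw [List.getElem_reverse] at e
    exact e
  · intro h
    apply List.ext_getElem (by simp)
    intro k hk hk'
    rw [List.getElem_reverse]
    have h2 : L.length - 1 - k < L.length := by omega
    have := h k hk
    rw [gi, gi, getD_eq_getElem L k hk, getD_eq_getElem L _ h2] at this
    exact this

-- the swapped list of A, pointwise
theorem swap_getD (L : List Int) (i j : Nat) (hi : i < L.length) (hj : j < L.length) (k : Nat) :
    ((L.set j (L.getD i 0)).set i (L.getD j 0)).getD k 0 = swv L i j k := by
  unfold swv gi
  by_cases hk : k < L.length
  · have hk2 : k < ((L.set j (L.getD i 0)).set i (L.getD j 0)).length := by simpa using hk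
    rw [getD_eq_getElem _ _ hk2, List.getElem_set, List.getElem_set]
    conv_rhs => rw [getD_eq_getElem L k hk]
    rcases eq_or_ne k i with hki | hki
    · simp [hki]
    · rcases eq_or_ne k j with hkj | hkj
      · simp only [hkj]
        rcases eq_or_ne i j with hij | hij
        · simp [hij]
        · simp [hij, Ne.symm hij]
      · simp [Ne.symm hki, Ne.symm hkj, hki, hkj]
  · have hlen : ((L.set j (L.getD i 0)).set i (L.getD j 0)).length ≤ k := by
      simpa using not_lt.mp hk
    have hki : k ≠ i := by omega
    have hkj : k ≠ j := by omega
    rw [List.getD_eq_getElem?_getD, List.getElem?_eq_none hlen]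
    simp only [hki, hkj, if_false]
    rw [List.getD_eq_getElem?_getD, List.getElem?_eq_none (not_lt.mp hk)]

theorem swv_self (L : List Int) (i k : Nat) : swv L i i k = gi L k := by
  unfold swv
  split_ifs with h1 <;> simp [h1]

theorem swv_i (L : List Int) (i j : Nat) : swv L i j i = gi L j := by
  unfold swv; simp

theorem swv_j (L : List Int) (i j : Nat) (h : j ≠ i) : swv L i j j = gi L i := by
  unfold swv; simp [h]

theorem swv_other (L : List Int) (i j k : Nat) (h1 : k ≠ i) (h2 : k ≠ j) :
    swv L i j k = gi L k := by
  unfold swv; simp [h1, h2]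

theorem pal_swap_iff (L : List Int) (i j : Nat) (hi : i < L.length) (hj : j < L.length) :
    is_symmetric ((L.set j (L.getD i 0)).set i (L.getD j 0)) = true ↔
      ∀ k, k < L.length → swv L i j k = swv L i j (L.length - 1 - k) := by
  unfold is_symmetric
  rw [pal_iff]
  have hlen : ((L.set j (L.getD i 0)).set i (L.getD j 0)).length = L.length := by simp
  rw [hlen]
  constructor
  · intro h k hk
    have h2 := h k hk
    unfold gi at h2
    rwa [swap_getD L i j hi hj, swap_getD L i j hi hj] at h2
  · intro h k hk
    have h2 := h k hk
    unfold gi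
    rwa [swap_getD L i j hi hj, swap_getD L i j hi hj]

-- the property A decides: some (possibly trivial) swap makes L a palindrome
def ASym (L : List Int) : Prop :=
  ∃ i, i < L.length ∧ ∃ j, j < L.length ∧
    ∀ k, k < L.length → swv L i j k = swv L i j (L.length - 1 - k)

theorem A_iff (L : List Int) : is_almost_symmetric L = true ↔ ASym L := by
  unfold is_almost_symmetric ASym
  simp only [List.any_eq_true, List.mem_range]
  constructor
  · rintro ⟨i, hi, j, hj, hs⟩
    exact ⟨i, hi, j, hj, (pal_swap_iff L i j hi hj).mp hs⟩
  · rintro ⟨i, hi, j, hj, h⟩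
    exact ⟨i, hi, j, hj, (pal_swap_iff L i j hi hj).mpr h⟩

theorem half_to_full (L : List Int) (k : Nat) (hk : k < L.length)
    (h : ∀ t, t < L.length / 2 → gi L t = gi L (L.length - 1 - t)) :
    gi L k = gi L (L.length - 1 - k) := by
  by_cases h1 : k < L.length / 2
  · exact h k h1
  · by_cases h2 : L.length - 1 - k < L.length / 2
    · have h3 := h _ h2
      rw [show L.length - 1 - (L.length - 1 - k) = k by omega] at h3
      exact h3.symm
    · rw [show L.length - 1 - k = k by omega]

theorem matched_out1 (L : List Int) (a k : Nat)
    (hcomp : ∀ t, t < L.length / 2 → t ≠ a → gi L t = gi L (L.length - 1 - t))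
    (hk : k < L.length) (h1 : k ≠ a) (h2 : k ≠ L.length - 1 - a) :
    gi L k = gi L (L.length - 1 - k) := by
  by_cases hA : k < L.length / 2
  · exact hcomp k hA h1
  · by_cases hB : L.length - 1 - k < L.length / 2
    · have hne : L.length - 1 - k ≠ a := by omega
      have h3 := hcomp _ hB hne
      rw [show L.length - 1 - (L.length - 1 - k) = k by omega] at h3
      exact h3.symm
    · rw [show L.length - 1 - k = k by omega]

theorem matched_out2 (L : List Int) (a b k : Nat)
    (hcomp : ∀ t, t < L.length / 2 → t ≠ a → t ≠ b → gi L t = gi L (L.length - 1 - t))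
    (hk : k < L.length) (h1 : k ≠ a) (h2 : k ≠ L.length - 1 - a)
    (h3 : k ≠ b) (h4 : k ≠ L.length - 1 - b) :
    gi L k = gi L (L.length - 1 - k) := by
  by_cases hA : k < L.length / 2
  · exact hcomp k hA h1 h3
  · by_cases hB : L.length - 1 - k < L.length / 2
    · have hna : L.length - 1 - k ≠ a := by omega
      have hnb : L.length - 1 - k ≠ b := by omega
      have h5 := hcomp _ hB hna hnb
      rw [show L.length - 1 - (L.length - 1 - k) = k by omega] at h5
      exact h5.symm
    · rw [show L.length - 1 - k = k by omega]

theorem case0_bwd (L : List Int) (hn : 0 < L.length)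
    (hcomp : ∀ t, t < L.length / 2 → gi L t = gi L (L.length - 1 - t)) : ASym L := by
  refine ⟨0, hn, 0, hn, fun k hk => ?_⟩
  rw [swv_self, swv_self]
  exact half_to_full L k hk hcomp

theorem case1_core (L : List Int) (a i j : Nat)
    (ha : a < L.length / 2) (hmis : gi L a ≠ gi L (L.length - 1 - a))
    (hcomp : ∀ t, t < L.length / 2 → t ≠ a → gi L t = gi L (L.length - 1 - t))
    (hi : i < L.length) (hj : j < L.length)
    (hia : i = a ∨ i = L.length - 1 - a)
    (h : ∀ k, k < L.length → swv L i j k = swv L i j (L.length - 1 - k)) :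
    L.length % 2 = 1 ∧
      (gi L (L.length / 2) = gi L a ∨ gi L (L.length / 2) = gi L (L.length - 1 - a)) := by
  have han : a < L.length := by omega
  have ha'n : L.length - 1 - a < L.length := by omega
  have haa' : a ≠ L.length - 1 - a := by omega
  by_cases hji : j = i
  · subst hji
    exfalso; apply hmis
    have h2 := h a han
    rwa [swv_self, swv_self] at h2
  by_cases hja : j = a
  · rcases hia with hi1 | hi1
    · exact absurd (hja.trans hi1.symm) hji
    · subst hi1; subst hja
      exfalso; apply hmis
      have h2 := h j han
      rw [swv_j L _ j hji, swv_i L _ j] at h2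
      exact h2.symm
  by_cases hja' : j = L.length - 1 - a
  · rcases hia with hi1 | hi1
    · subst hi1; subst hja'
      exfalso; apply hmis
      have h2 := h i han
      rw [swv_i L i _, swv_j L i _ hji] at h2
      exact h2.symm
    · exact absurd (hja'.trans hi1.symm) hji
  rcases hia with hi1 | hi1
  · subst hi1
    have hE1 : gi L j = gi L (L.length - 1 - i) := by
      have h2 := h i han
      rw [swv_i L i j,
          swv_other L i j (L.length - 1 - i) (Ne.symm haa') (fun hx => hja' hx.symm)] at h2
      exact h2
    by_cases hjm : j = L.length - 1 - j
    · refine ⟨by omega, Or.inr ?_⟩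
      rw [show L.length / 2 = j by omega]
      exact hE1
    · exfalso
      have hE2 : gi L i = gi L (L.length - 1 - j) := by
        have h2 := h j hj
        rw [swv_j L i j hji,
            swv_other L i j (L.length - 1 - j) (by omega) (by omega)] at h2
        exact h2
      have hE3 : gi L j = gi L (L.length - 1 - j) :=
        matched_out1 L i j hcomp hj hji hja'
      exact hmis (hE2.trans (hE3.symm.trans hE1))
  · subst hi1
    have hE1 : gi L a = gi L j := by
      have h2 := h a han
      rw [swv_other L (L.length - 1 - a) j a haa' (fun hx => hja hx.symm),
          swv_i L (L.length - 1 - a) j] at h2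
      exact h2
    by_cases hjm : j = L.length - 1 - j
    · refine ⟨by omega, Or.inl ?_⟩
      rw [show L.length / 2 = j by omega]
      exact hE1.symm
    · exfalso
      have hE2 : gi L (L.length - 1 - a) = gi L (L.length - 1 - j) := by
        have h2 := h j hj
        rw [swv_j L (L.length - 1 - a) j hji,
            swv_other L (L.length - 1 - a) j (L.length - 1 - j) (by omega) (by omega)] at h2
        exact h2
      have hE3 : gi L j = gi L (L.length - 1 - j) :=
        matched_out1 L a j hcomp hj hja hji
      exact hmis (hE1.trans (hE3.trans hE2.symm))

theorem case1_fwd (L : List Int) (a : Nat)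
    (ha : a < L.length / 2) (hmis : gi L a ≠ gi L (L.length - 1 - a))
    (hcomp : ∀ t, t < L.length / 2 → t ≠ a → gi L t = gi L (L.length - 1 - t))
    (hA : ASym L) :
    L.length % 2 = 1 ∧
      (gi L (L.length / 2) = gi L a ∨ gi L (L.length / 2) = gi L (L.length - 1 - a)) := by
  obtain ⟨i, hi, j, hj, h⟩ := hA
  have touch : i = a ∨ i = L.length - 1 - a ∨ j = a ∨ j = L.length - 1 - a := by
    by_contra hc
    push_neg at hc
    obtain ⟨h1, h2, h3, h4⟩ := hc
    have h5 := h a (by omega)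
    rw [swv_other L i j a (Ne.symm h1) (Ne.symm h3),
        swv_other L i j (L.length - 1 - a) (Ne.symm h2) (Ne.symm h4)] at h5
    exact hmis h5
  have h' : ∀ k, k < L.length → swv L j i k = swv L j i (L.length - 1 - k) := by
    intro k hk
    rw [← swv_comm L i j k, ← swv_comm L i j (L.length - 1 - k)]
    exact h k hk
  rcases touch with ht | ht | ht | ht
  · exact case1_core L a i j ha hmis hcomp hi hj (Or.inl ht) h
  · exact case1_core L a i j ha hmis hcomp hi hj (Or.inr ht) h
  · exact case1_core L a j i ha hmis hcomp hj hi (Or.inl ht) h'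
  · exact case1_core L a j i ha hmis hcomp hj hi (Or.inr ht) h'

theorem case1_bwd (L : List Int) (a : Nat)
    (ha : a < L.length / 2)
    (hcomp : ∀ t, t < L.length / 2 → t ≠ a → gi L t = gi L (L.length - 1 - t))
    (hodd : L.length % 2 = 1)
    (hd : gi L (L.length / 2) = gi L a ∨ gi L (L.length / 2) = gi L (L.length - 1 - a)) :
    ASym L := by
  have han : a < L.length := by omega
  have ha'n : L.length - 1 - a < L.length := by omega
  have hmn : L.length / 2 < L.length := by omega
  have ham : a ≠ L.length / 2 := by omega
  have ha'm : L.length - 1 - a ≠ L.length / 2 := by omega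
  have hmm : L.length - 1 - (L.length / 2) = L.length / 2 := by omega
  rcases hd with hd | hd
  · -- middle equals the left value: swap the right end of the pair with the middle
    refine ⟨L.length - 1 - a, ha'n, L.length / 2, hmn, fun k hk => ?_⟩
    by_cases hk1 : k = a
    · subst hk1
      rw [swv_other L (L.length - 1 - k) (L.length / 2) k (by omega) ham,
          swv_i L (L.length - 1 - k) (L.length / 2), hd]
    · by_cases hk2 : k = L.length - 1 - a
      · subst hk2
        rw [swv_i L (L.length - 1 - a) (L.length / 2), hd,
            show L.length - 1 - (L.length - 1 - a) = a by omega,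
            swv_other L (L.length - 1 - a) (L.length / 2) a (by omega) ham]
      · by_cases hk3 : k = L.length / 2
        · subst hk3
          rw [hmm]
        · rw [swv_other L (L.length - 1 - a) (L.length / 2) k hk2 hk3,
              swv_other L (L.length - 1 - a) (L.length / 2) (L.length - 1 - k)
                (by omega) (by omega)]
          exact matched_out1 L a k hcomp hk hk1 hk2
  · -- middle equals the right value: swap the left end of the pair with the middle
    refine ⟨a, han, L.length / 2, hmn, fun k hk => ?_⟩
    by_cases hk1 : k = a
    · subst hk1
      rw [swv_i L k (L.length / 2), hd,
          swv_other L k (L.length / 2) (L.length - 1 - k) (by omega) ha'm]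
    · by_cases hk2 : k = L.length - 1 - a
      · subst hk2
        rw [swv_other L a (L.length / 2) (L.length - 1 - a) (by omega) ha'm,
            show L.length - 1 - (L.length - 1 - a) = a by omega,
            swv_i L a (L.length / 2), hd]
      · by_cases hk3 : k = L.length / 2
        · subst hk3
          rw [hmm]
        · rw [swv_other L a (L.length / 2) k hk1 hk3,
              swv_other L a (L.length / 2) (L.length - 1 - k) (by omega) (by omega)]
          exact matched_out1 L a k hcomp hk hk1 hk2

theorem touch_pair (L : List Int) (i j a : Nat)
    (ha : a < L.length / 2) (hmis : gi L a ≠ gi L (L.length - 1 - a))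
    (h : ∀ k, k < L.length → swv L i j k = swv L i j (L.length - 1 - k)) :
    i = a ∨ i = L.length - 1 - a ∨ j = a ∨ j = L.length - 1 - a := by
  by_contra hc
  push_neg at hc
  obtain ⟨h1, h2, h3, h4⟩ := hc
  have h5 := h a (by omega)
  rw [swv_other L i j a (Ne.symm h1) (Ne.symm h3),
      swv_other L i j (L.length - 1 - a) (Ne.symm h2) (Ne.symm h4)] at h5
  exact hmis h5

theorem case2_core (L : List Int) (a b i j : Nat)
    (ha : a < L.length / 2) (hb : b < L.length / 2) (hab : a ≠ b)
    (hi : i < L.length) (hj : j < L.length)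
    (hia : i = a ∨ i = L.length - 1 - a) (hjb : j = b ∨ j = L.length - 1 - b)
    (h : ∀ k, k < L.length → swv L i j k = swv L i j (L.length - 1 - k)) :
    (gi L b = gi L (L.length - 1 - a) ∧ gi L a = gi L (L.length - 1 - b)) ∨
      (gi L b = gi L a ∧ gi L (L.length - 1 - b) = gi L (L.length - 1 - a)) := by
  have han : a < L.length := by omega
  have hbn : b < L.length := by omega
  rcases hia with hi1 | hi1 <;> rcases hjb with hj1 | hj1
  · -- i = a, j = b
    have h2 := h a han
    rw [← hi1] at h2
    rw [swv_i L i j, swv_other L i j (L.length - 1 - i) (by omega) (by omega)] at h2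
    have h3 := h b hbn
    rw [← hj1] at h3
    rw [swv_j L i j (by omega), swv_other L i j (L.length - 1 - j) (by omega) (by omega)] at h3
    rw [hi1, hj1] at h2 h3
    exact Or.inl ⟨h2, h3⟩
  · -- i = a, j = L.length - 1 - b
    have h2 := h a han
    rw [← hi1] at h2
    rw [swv_i L i j, swv_other L i j (L.length - 1 - i) (by omega) (by omega)] at h2
    have h3 := h b hbn
    rw [← hj1] at h3
    rw [swv_other L i j b (by omega) (by omega), swv_j L i j (by omega)] at h3
    rw [hi1] at h2 h3
    rw [hj1] at h2
    exact Or.inr ⟨h3, h2⟩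
  · -- i = L.length - 1 - a, j = b
    have h2 := h a han
    rw [← hi1] at h2
    rw [swv_other L i j a (by omega) (by omega), swv_i L i j] at h2
    have h3 := h b hbn
    rw [← hj1] at h3
    rw [swv_j L i j (by omega), swv_other L i j (L.length - 1 - j) (by omega) (by omega)] at h3
    rw [hj1] at h2 h3
    rw [hi1] at h3
    exact Or.inr ⟨h2.symm, h3.symm⟩
  · -- i = L.length - 1 - a, j = L.length - 1 - b
    have h2 := h a han
    rw [← hi1] at h2
    rw [swv_other L i j a (by omega) (by omega), swv_i L i j] at h2
    have h3 := h b hbn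
    rw [← hj1] at h3
    rw [swv_other L i j b (by omega) (by omega), swv_j L i j (by omega)] at h3
    rw [hj1] at h2
    rw [hi1] at h3
    exact Or.inl ⟨h3, h2⟩

theorem case2_fwd (L : List Int) (a b : Nat)
    (ha : a < L.length / 2) (hb : b < L.length / 2) (hab : a ≠ b)
    (hmia : gi L a ≠ gi L (L.length - 1 - a)) (hmib : gi L b ≠ gi L (L.length - 1 - b))
    (hA : ASym L) :
    (gi L b = gi L (L.length - 1 - a) ∧ gi L a = gi L (L.length - 1 - b)) ∨
      (gi L b = gi L a ∧ gi L (L.length - 1 - b) = gi L (L.length - 1 - a)) := by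
  obtain ⟨i, hi, j, hj, h⟩ := hA
  have h' : ∀ k, k < L.length → swv L j i k = swv L j i (L.length - 1 - k) := by
    intro k hk
    rw [← swv_comm L i j k, ← swv_comm L i j (L.length - 1 - k)]
    exact h k hk
  have tA := touch_pair L i j a ha hmia h
  have tB := touch_pair L i j b hb hmib h
  rcases tA with h1 | h1 | h1 | h1 <;> rcases tB with h2 | h2 | h2 | h2
  · exfalso; omega
  · exfalso; omega
  · exact case2_core L a b i j ha hb hab hi hj (Or.inl h1) (Or.inl h2) h
  · exact case2_core L a b i j ha hb hab hi hj (Or.inl h1) (Or.inr h2) h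
  · exfalso; omega
  · exfalso; omega
  · exact case2_core L a b i j ha hb hab hi hj (Or.inr h1) (Or.inl h2) h
  · exact case2_core L a b i j ha hb hab hi hj (Or.inr h1) (Or.inr h2) h
  · exact case2_core L a b j i ha hb hab hj hi (Or.inl h1) (Or.inl h2) h'
  · exact case2_core L a b j i ha hb hab hj hi (Or.inl h1) (Or.inr h2) h'
  · exfalso; omega
  · exfalso; omega
  · exact case2_core L a b j i ha hb hab hj hi (Or.inr h1) (Or.inl h2) h'
  · exact case2_core L a b j i ha hb hab hj hi (Or.inr h1) (Or.inr h2) h'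
  · exfalso; omega
  · exfalso; omega

theorem case2_bwd (L : List Int) (a b : Nat)
    (ha : a < L.length / 2) (hb : b < L.length / 2) (hab : a ≠ b)
    (hcomp : ∀ t, t < L.length / 2 → t ≠ a → t ≠ b → gi L t = gi L (L.length - 1 - t))
    (hc : (gi L b = gi L (L.length - 1 - a) ∧ gi L a = gi L (L.length - 1 - b)) ∨
      (gi L b = gi L a ∧ gi L (L.length - 1 - b) = gi L (L.length - 1 - a))) :
    ASym L := by
  have han : a < L.length := by omega
  have hbn : b < L.length := by omega
  have ha'n : L.length - 1 - a < L.length := by omega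
  rcases hc with ⟨c1, c2⟩ | ⟨c1, c2⟩
  · -- swap positions a and b
    refine ⟨a, han, b, hbn, fun k hk => ?_⟩
    by_cases hk1 : k = a
    · rw [hk1, swv_i L a b, swv_other L a b (L.length - 1 - a) (by omega) (by omega)]
      exact c1
    · by_cases hk2 : k = L.length - 1 - a
      · rw [hk2, swv_other L a b (L.length - 1 - a) (by omega) (by omega),
            show L.length - 1 - (L.length - 1 - a) = a by omega, swv_i L a b]
        exact c1.symm
      · by_cases hk3 : k = b
        · rw [hk3, swv_j L a b (by omega),
              swv_other L a b (L.length - 1 - b) (by omega) (by omega)]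
          exact c2
        · by_cases hk4 : k = L.length - 1 - b
          · rw [hk4, swv_other L a b (L.length - 1 - b) (by omega) (by omega),
                show L.length - 1 - (L.length - 1 - b) = b by omega, swv_j L a b (by omega)]
            exact c2.symm
          · rw [swv_other L a b k hk1 hk3,
                swv_other L a b (L.length - 1 - k) (by omega) (by omega)]
            exact matched_out2 L a b k hcomp hk hk1 hk2 hk3 hk4
  · -- swap positions (L.length - 1 - a) and b
    refine ⟨L.length - 1 - a, ha'n, b, hbn, fun k hk => ?_⟩
    by_cases hk1 : k = a
    · rw [hk1, swv_other L (L.length - 1 - a) b a (by omega) (by omega),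
          swv_i L (L.length - 1 - a) b]
      exact c1.symm
    · by_cases hk2 : k = L.length - 1 - a
      · rw [hk2, swv_i L (L.length - 1 - a) b,
            show L.length - 1 - (L.length - 1 - a) = a by omega,
            swv_other L (L.length - 1 - a) b a (by omega) (by omega)]
        exact c1
      · by_cases hk3 : k = b
        · rw [hk3, swv_j L (L.length - 1 - a) b (by omega),
              swv_other L (L.length - 1 - a) b (L.length - 1 - b) (by omega) (by omega)]
          exact c2.symm
        · by_cases hk4 : k = L.length - 1 - b
          · rw [hk4, swv_other L (L.length - 1 - a) b (L.length - 1 - b) (by omega) (by omega),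
                show L.length - 1 - (L.length - 1 - b) = b by omega,
                swv_j L (L.length - 1 - a) b (by omega)]
            exact c2
          · rw [swv_other L (L.length - 1 - a) b k hk2 hk3,
                swv_other L (L.length - 1 - a) b (L.length - 1 - k) (by omega) (by omega)]
            exact matched_out2 L a b k hcomp hk hk1 hk2 hk3 hk4
  
theorem case3_fwd (L : List Int) (a b c : Nat)
    (ha : a < L.length / 2) (hb : b < L.length / 2) (hc : c < L.length / 2)
    (hab : a ≠ b) (hac : a ≠ c) (hbc : b ≠ c)
    (hmia : gi L a ≠ gi L (L.length - 1 - a)) (hmib : gi L b ≠ gi L (L.length - 1 - b))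
    (hmic : gi L c ≠ gi L (L.length - 1 - c)) :
    ¬ ASym L := by
  rintro ⟨i, hi, j, hj, h⟩
  have tA := touch_pair L i j a ha hmia h
  have tB := touch_pair L i j b hb hmib h
  have tC := touch_pair L i j c hc hmic h
  rcases tA with h1 | h1 | h1 | h1 <;> rcases tB with h2 | h2 | h2 | h2 <;>
    rcases tC with h3 | h3 | h3 | h3 <;> omega

theorem main_ne (L : List Int) (hne : L ≠ []) :
    is_almost_symmetric L = is_almost_symmetric_alt L := by
  have hn : 0 < L.length := List.length_pos_iff.mpr hne
  rw [Bool.eq_iff_iff, A_iff]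
  unfold is_almost_symmetric_alt
  have hmem := mem_pvMism L
  have hnd : (pvMism L).Nodup := List.Nodup.filter _ List.nodup_range
  rcases hmm : pvMism L with _ | ⟨a, _ | ⟨b, _ | ⟨c, rest⟩⟩⟩ <;> simp only [hmm]
  · -- no mismatched pair
    constructor
    · intro _; trivial
    · intro _
      apply case0_bwd L hn
      intro t ht
      by_contra hx
      have hmem2 : t ∈ pvMism L := (hmem t).mpr ⟨ht, hx⟩
      rw [hmm] at hmem2
      simp at hmem2
  · -- exactly one mismatched pair
    obtain ⟨ha, hmis⟩ := (hmem a).mp (by rw [hmm]; simp)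
    have hcomp : ∀ t, t < L.length / 2 → t ≠ a → gi L t = gi L (L.length - 1 - t) := by
      intro t ht hta
      by_contra hx
      have hmem2 : t ∈ pvMism L := (hmem t).mpr ⟨ht, hx⟩
      rw [hmm] at hmem2
      simp at hmem2
      exact hta hmem2
    simp only [Bool.and_eq_true, Bool.or_eq_true, beq_iff_eq, decide_eq_true_eq]
    constructor
    · intro hA
      exact case1_fwd L a ha hmis hcomp hA
    · rintro ⟨h1, h2⟩
      exact case1_bwd L a ha hcomp h1 h2
  · -- exactly two mismatched pairs
    obtain ⟨ha, hmia⟩ := (hmem a).mp (by rw [hmm]; simp)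
    obtain ⟨hb, hmib⟩ := (hmem b).mp (by rw [hmm]; simp)
    have hab : a ≠ b := by
      rw [hmm] at hnd
      intro h
      exact (List.nodup_cons.mp hnd).1 (by simp [h])
    have hcomp : ∀ t, t < L.length / 2 → t ≠ a → t ≠ b → gi L t = gi L (L.length - 1 - t) := by
      intro t ht hta htb
      by_contra hx
      have hmem2 : t ∈ pvMism L := (hmem t).mpr ⟨ht, hx⟩
      rw [hmm] at hmem2
      simp at hmem2
      rcases hmem2 with h | h
      · exact hta h
      · exact htb h
    simp only [Bool.and_eq_true, Bool.or_eq_true, beq_iff_eq]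
    constructor
    · intro hA
      exact case2_fwd L a b ha hb hab hmia hmib hA
    · intro hcnd
      exact case2_bwd L a b ha hb hab hcomp hcnd
  · -- three or more mismatched pairs: no single swap can fix them
    obtain ⟨ha, hmia⟩ := (hmem a).mp (by rw [hmm]; simp)
    obtain ⟨hb, hmib⟩ := (hmem b).mp (by rw [hmm]; simp)
    obtain ⟨hc, hmic⟩ := (hmem c).mp (by rw [hmm]; simp)
    have hdist : a ≠ b ∧ a ≠ c ∧ b ≠ c := by
      rw [hmm] at hnd
      have h1 := List.nodup_cons.mp hnd
      have h2 := List.nodup_cons.mp h1.2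
      refine ⟨fun h => h1.1 (by simp [h]), fun h => h1.1 (by simp [h]),
        fun h => h2.1 (by simp [h])⟩
    simp only [Bool.false_eq_true, iff_false]
    exact case3_fwd L a b c ha hb hc hdist.1 hdist.2.1 hdist.2.2 hmia hmib hmic

-- ===== VERDICT =====
theorem is_almost_symmetric_spec : Claim_unchanged_is_almost_symmetric := by
  intro L _ hD
  exact main_ne L hD
theorem is_almost_symmetric_changed : Claim_changed_is_almost_symmetric := by
  unfold Claim_changed_is_almost_symmetric; decide
theorem is_almost_symmetric_tight : Claim_exact_is_almost_symmetric := by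
  intro L _ hD
  subst hD
  decide
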